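-- pv_equiv track=rewrite | github.com/jeffersonscientific/spack | lib/spack/spack/compiler.py | tokenize_flags
-- ===== SOURCE A (Python) =====
-- def tokenize_flags(flags_values, propagate=False):
--     """Given a compiler flag specification as a string, this returns a list
--     where the entries are the flags. For compiler options which set values
--     using the syntax "-flag value", this function groups flags and their
--     values together. Any token not preceded by a "-" is considered the
--     value of a prior flag."""
--     tokens = flags_values.split()
--     if not tokens:
--         return []
--     flag = tokens[0]
--     flags_with_propagation = []
--     for token in tokens[1:]:
--         if not token.startswith("-"):
--             flag += " " + token
--         else:
--             flags_with_propagation.append((flag, propagate))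
--             flag = token
--     flags_with_propagation.append((flag, propagate))
--     return flags_with_propagation
-- ===== SOURCE B (Python) =====
-- def tokenize_flags(flags_values, propagate=False):
--     """Two-phase segmentation: split off each group (a flag token followed by
--     its non-dash value tokens), then join each group once with ' '."""
--     tokens = flags_values.split()
--     result = []
--     while tokens:
--         head, rest = tokens[0], tokens[1:]
--         vals = []
--         while rest and not rest[0].startswith("-"):
--             vals = vals + [rest[0]]
--             rest = rest[1:]
--         result.append((" ".join([head] + vals), propagate))
--         tokens = rest
--     return result
-- ===== Notes on version B (the rewrite author's own statement) =====
-- stated objective: alternative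
-- what changed: A accumulates each flag incrementally by string concatenation and emits the previous group at every dash boundary; B segments the token list group by group (head plus the run of non-dash value tokens) and joins each group once with a space.
import Mathlib
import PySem

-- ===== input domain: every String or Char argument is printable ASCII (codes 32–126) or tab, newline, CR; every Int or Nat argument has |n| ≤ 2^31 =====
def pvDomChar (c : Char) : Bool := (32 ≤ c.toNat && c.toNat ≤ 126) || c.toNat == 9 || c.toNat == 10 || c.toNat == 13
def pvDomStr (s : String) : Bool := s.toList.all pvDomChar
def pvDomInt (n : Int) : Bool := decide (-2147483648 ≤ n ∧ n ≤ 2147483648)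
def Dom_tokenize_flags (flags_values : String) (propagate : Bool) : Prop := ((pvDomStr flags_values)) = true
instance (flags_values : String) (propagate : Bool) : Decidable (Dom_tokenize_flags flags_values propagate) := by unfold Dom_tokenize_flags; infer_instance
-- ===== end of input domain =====

-- B replaces A's incremental string accumulation with a group-by-group segmentation
-- (collect each flag's value tokens, join once); objective: alternative decomposition, same cost.


-- ===== PORT A =====
-- A's for-loop over tokens[1:] with state (flag, flags_with_propagation)
def tokALoop (propagate : Bool) : List String → String → List (String × Bool) → List (String × Bool)
  | [], flag, acc => acc ++ [(flag, propagate)]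
  | token :: rest, flag, acc =>
    if ¬ PySem.Str.startswith token "-" then
      tokALoop propagate rest (flag ++ " " ++ token) acc
    else
      tokALoop propagate rest token (acc ++ [(flag, propagate)])

def tokenize_flags (flags_values : String) (propagate : Bool) : List (String × Bool) :=
  match PySem.Str.split₀ flags_values with
  | [] => []
  | t0 :: rest => tokALoop propagate rest t0 []

-- ===== PORT B =====
-- Source B's inner while: collect the run of non-dash value tokens into vals, return (vals, remaining rest)
def tokBVals (vals : List String) : List String → List String × List String
  | [] => (vals, [])
  | x :: xs =>
    if ¬ PySem.Str.startswith x "-" then tokBVals (vals ++ [x]) xs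
    else (vals, x :: xs)

theorem tokBVals_snd_len (l : List String) : ∀ vals, (tokBVals vals l).2.length ≤ l.length := by
  induction l with
  | nil => intro vals; simp [tokBVals]
  | cons x xs ih =>
    intro vals
    cases hc : PySem.Chars.startswith x.toList ['-'] with
    | true => simp [tokBVals, show ("-" : String).toList = ['-'] from rfl, hc]
    | false =>
      simp [tokBVals, show ("-" : String).toList = ['-'] from rfl, hc]
      exact Nat.le_succ_of_le (ih _)

-- Source B's outer while over the remaining tokens
def tokBLoop (propagate : Bool) : List String → List (String × Bool)
  | [] => []
  | head :: rest =>
    let vr := tokBVals [] rest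
    (PySem.Str.join " " ([head] ++ vr.1), propagate) :: tokBLoop propagate vr.2
termination_by l => l.length
decreasing_by
  simpa using Nat.lt_succ_of_le (tokBVals_snd_len rest [])

def tokenize_flags_alt (flags_values : String) (propagate : Bool) : List (String × Bool) :=
  tokBLoop propagate (PySem.Str.split₀ flags_values)

-- ===== PRECONDITION & SPEC =====
def Spec_tokenize_flags (flags_values : String) (propagate : Bool) (out : List (String × Bool)) : Prop := out = tokenize_flags_alt flags_values propagate
instance (flags_values : String) (propagate : Bool) (out : List (String × Bool)) : Decidable (Spec_tokenize_flags flags_values propagate out) := by unfold Spec_tokenize_flags; infer_instance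

-- ===== CLAIM (what is proved, stated in full; the proofs are below) =====
def Claim_equal_tokenize_flags : Prop := ∀ (flags_values : String) (propagate : Bool), Dom_tokenize_flags flags_values propagate → Spec_tokenize_flags flags_values propagate (tokenize_flags flags_values propagate)

-- ===== LEMMAS AND PROOFS =====

theorem dashToList : ("-" : String).toList = ['-'] := rfl

theorem charsJoin_append_singleton (sep q : List Char) :
    ∀ (ps : List (List Char)) (p : List Char),
      PySem.Chars.join sep ((p :: ps) ++ [q]) = PySem.Chars.join sep (p :: ps) ++ sep ++ q := by
  intro ps
  induction ps with
  | nil => intro p; simp [PySem.Chars.join_cons_cons, PySem.Chars.join_singleton]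
  | cons r rs ih =>
    intro p
    have h1 : (p :: r :: rs) ++ [q] = p :: r :: (rs ++ [q]) := rfl
    rw [h1, PySem.Chars.join_cons_cons, PySem.Chars.join_cons_cons]
    have h3 : r :: (rs ++ [q]) = (r :: rs) ++ [q] := rfl
    rw [h3, ih r]
    simp [List.append_assoc]

theorem strJoin_singleton (s : String) : PySem.Str.join " " [s] = s := by
  apply String.toList_inj.mp
  simp [PySem.Str.toList_join, PySem.Chars.join_singleton]

theorem strJoin_snoc (g : List String) (hg : g ≠ []) (x : String) :
    PySem.Str.join " " (g ++ [x]) = PySem.Str.join " " g ++ " " ++ x := by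
  apply String.toList_inj.mp
  obtain ⟨p, ps, rfl⟩ := List.exists_cons_of_ne_nil hg
  simp only [PySem.Str.toList_join, List.map_append, List.map_cons, List.map_nil,
    String.toList_append]
  exact charsJoin_append_singleton _ _ _ _

theorem tokBVals_accum (l : List String) :
    ∀ vals, tokBVals vals l = (vals ++ (tokBVals [] l).1, (tokBVals [] l).2) := by
  induction l with
  | nil => intro vals; simp [tokBVals]
  | cons x xs ih =>
    intro vals
    cases hc : PySem.Chars.startswith x.toList ['-'] with
    | true => simp [tokBVals, dashToList, hc]
    | false =>
      simp [tokBVals, dashToList, hc]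
      rw [ih (vals ++ [x]), ih [x]]
      simp

theorem tokBLoop_cons (propagate : Bool) (head : String) (rest : List String) :
    tokBLoop propagate (head :: rest) =
      (PySem.Str.join " " ([head] ++ (tokBVals [] rest).1), propagate)
        :: tokBLoop propagate (tokBVals [] rest).2 := by
  rw [tokBLoop]

theorem tokALoop_eq_segments (propagate : Bool) :
    ∀ (rest : List String) (g : List String) (acc : List (String × Bool)), g ≠ [] →
      tokALoop propagate rest (PySem.Str.join " " g) acc =
        acc ++ ((PySem.Str.join " " (tokBVals g rest).1, propagate)
                  :: tokBLoop propagate (tokBVals g rest).2) := by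
  intro rest
  induction rest with
  | nil => intro g acc hg; simp [tokALoop, tokBVals, tokBLoop]
  | cons x xs ih =>
    intro g acc hg
    cases hc : PySem.Chars.startswith x.toList ['-'] with
    | true =>
      -- boundary: A emits the current group and restarts from x; B's inner loop stops here
      simp only [tokALoop, tokBVals, PySem.Str.startswith_eq, dashToList, hc]
      norm_num
      have hx := ih [x] (acc ++ [(PySem.Str.join " " g, propagate)]) (by simp)
      rw [strJoin_singleton x] at hx
      rw [hx, tokBLoop_cons, tokBVals_accum xs [x]]
      simp
    | false =>
      -- value token: A extends the flag string; B extends the group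
      simp only [tokALoop, tokBVals, PySem.Str.startswith_eq, dashToList, hc]
      norm_num
      rw [← strJoin_snoc g hg x]
      exact ih (g ++ [x]) acc (by simp)

theorem tokenize_flags_eq (flags_values : String) (propagate : Bool) :
    tokenize_flags flags_values propagate = tokenize_flags_alt flags_values propagate := by
  cases hsplit : PySem.Str.split₀ flags_values with
  | nil => simp [tokenize_flags, tokenize_flags_alt, hsplit, tokBLoop]
  | cons t0 rest =>
    simp only [tokenize_flags, tokenize_flags_alt, hsplit]
    rw [tokBLoop_cons]
    have h := tokALoop_eq_segments propagate rest [t0] [] (by simp)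
    rw [strJoin_singleton t0] at h
    rw [h, tokBVals_accum rest [t0]]
    simp

-- ===== VERDICT (by name: the statement is the Claim_ definition above) =====
theorem tokenize_flags_spec : Claim_equal_tokenize_flags := by
  intro flags_values propagate _
  exact tokenize_flags_eq flags_values propagate
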